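-- pv_equiv track=rewrite | github.com/tr1503/LeetCode | arrayAndString/contestMatch.py | findContestMatch
-- ===== SOURCE A (Python) =====
-- def findContestMatch(n):
--     """
--     :type n: int
--     :rtype: str
--     """
--     res = []
--     for i in range(1,n+1):
--         res.append(str(i))
--
--     def helper(n,res):
--         if n == 1:
--             return
--         for i in range(n):
--             res[i] = "(" + res[i] + "," + res[n - i - 1] + ")"
--         helper(n // 2,res)
--     helper(n,res)
--     return res[0]
-- ===== SOURCE B (Python) =====
-- def findContestMatch(n):
--     res = [str(i) for i in range(1, n + 1)]
--     while len(res) > 1: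
--         half = len(res) // 2
--         res = ['(' + res[i] + ',' + res[len(res) - i - 1] + ')' for i in range(half)]
--     return res[0]
-- ===== Notes on version B (the rewrite author's own statement) =====
-- stated objective: idiomatic
-- what changed: Replaced the recursive helper that mutates all n slots of a long list in place each round with an iterative while-loop that rebuilds a fresh half-length list of exactly the surviving pairs each round.
-- outside the precondition, e.g. on findContestMatch(0): A raises RecursionError, B raises IndexError
import Mathlib
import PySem

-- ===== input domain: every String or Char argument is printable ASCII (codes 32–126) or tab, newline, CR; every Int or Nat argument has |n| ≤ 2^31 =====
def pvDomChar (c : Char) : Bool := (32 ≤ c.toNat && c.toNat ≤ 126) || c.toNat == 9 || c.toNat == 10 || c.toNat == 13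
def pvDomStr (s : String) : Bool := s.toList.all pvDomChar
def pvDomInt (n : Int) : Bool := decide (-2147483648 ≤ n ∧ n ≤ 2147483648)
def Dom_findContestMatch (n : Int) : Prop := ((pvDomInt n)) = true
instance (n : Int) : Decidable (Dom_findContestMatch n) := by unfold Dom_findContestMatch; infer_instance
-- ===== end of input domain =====

-- B drops A's recursive helper and in-place prefix mutation: it iteratively rebuilds a fresh
-- half-length list of the paired strings each round (more idiomatic, same result for n ≥ 1).


-- ===== PORT A =====
-- one round of A's inner for-loop: for i in range(n): res[i] = "(" + res[i] + "," + res[n-i-1] + ")"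
-- (in-place mutation: each step reads the CURRENT list, like Python)
def findContestMatch.round (n : Nat) (res : List String) : List String :=
  (List.range n).foldl
    (fun r i => r.set i ("(" ++ r.getD i "" ++ "," ++ r.getD (n - i - 1) "" ++ ")")) res

-- A's recursive helper(n, res); Python diverges (RecursionError) for n ≤ 0, which Pre_ excludes,
-- so the n = 0 base case here is unreachable on admitted inputs.
def findContestMatch.helper : Nat → List String → List String
  | 0, res => res
  | 1, res => res
  | (n+2), res => findContestMatch.helper ((n+2)/2) (findContestMatch.round (n+2) res)
decreasing_by omega

-- n.toNat = n on Pre_ (1 ≤ n); res[0] on a nonempty list is headD (Pre_ guarantees nonempty)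
def findContestMatch (n : Int) : String :=
  let res := (PySem.List.pyRange 1 (n+1) 1).map PySem.Int.toStr
  (findContestMatch.helper n.toNat res).headD ""

-- ===== PORT B =====
-- one round of Source B's while-body: fresh list of the len(res)//2 surviving pairs
def findContestMatch_alt.step (r : List String) : List String :=
  (List.range (r.length / 2)).map
    (fun i => "(" ++ r.getD i "" ++ "," ++ r.getD (r.length - i - 1) "" ++ ")")

-- Source B's 'while len(res) > 1'
def findContestMatch_alt.loop (r : List String) : List String :=
  if 1 < r.length then findContestMatch_alt.loop (findContestMatch_alt.step r) else r
termination_by r.length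
decreasing_by simp [findContestMatch_alt.step]; omega

def findContestMatch_alt (n : Int) : String :=
  (findContestMatch_alt.loop ((PySem.List.pyRange 1 (n+1) 1).map PySem.Int.toStr)).headD ""

-- ===== PRECONDITION & SPEC =====
-- Pre_ excludes n ≤ 0, where Python A diverges into helper(0, res) (RecursionError):
-- A returns normally exactly for n ≥ 1.
def Pre_findContestMatch (n : Int) : Prop := 1 ≤ n
instance (n : Int) : Decidable (Pre_findContestMatch n) := by unfold Pre_findContestMatch; infer_instance
def pvWitness_findContestMatch : Int := 4

def Spec_findContestMatch (n : Int) (out : String) : Prop := out = findContestMatch_alt n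
instance (n : Int) (out : String) : Decidable (Spec_findContestMatch n out) := by unfold Spec_findContestMatch; infer_instance

-- ===== CLAIM (what is proved, stated in full; the proofs are below) =====
def Claim_equal_findContestMatch : Prop := ∀ (n : Int), Dom_findContestMatch n → Pre_findContestMatch n → Spec_findContestMatch n (findContestMatch n)

-- ===== LEMMAS AND PROOFS =====

-- getD after set, at the written index
theorem pv_getD_set_eq (r : List String) (i : Nat) (v : String) (h : i < r.length) :
    (r.set i v).getD i "" = v := by simp [List.getD, h]

-- getD after set, away from the written index
theorem pv_getD_set_ne (r : List String) (i j : Nat) (v : String) (h : i ≠ j) :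
    (r.set i v).getD j "" = r.getD j "" := by simp [List.getD, h]

-- getD of a take agrees with getD below the cut
theorem pv_getD_take (r : List String) (m j : Nat) (hj : j < m) :
    (r.take m).getD j "" = r.getD j "" := by simp [List.getD, hj]

-- a foldl of in-place writes preserves the length
theorem pv_foldl_set_length (f : List String → Nat → String) :
    ∀ (l : List Nat) (res : List String),
      (l.foldl (fun r i => r.set i (f r i)) res).length = res.length := by
  intro l
  induction l with
  | nil => intro res; rfl
  | cons i l ih => intro res; rw [List.foldl_cons, ih, List.length_set]

-- A's round preserves list length
theorem pv_round_length (n : Nat) (res : List String) :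
    (findContestMatch.round n res).length = res.length := by
  unfold findContestMatch.round
  exact pv_foldl_set_length _ (List.range n) res

-- invariant for the first k ≤ m/2 steps of A's round: entries below k hold the new pair,
-- entries at or above k are untouched (reads at step i hit untouched indices i and m-i-1)
theorem pv_fold_prefix (m : Nat) (res : List String) (hm : m ≤ res.length) :
    ∀ k, k ≤ m / 2 → ∀ j,
      (((List.range k).foldl
        (fun r i => r.set i ("(" ++ r.getD i "" ++ "," ++ r.getD (m - i - 1) "" ++ ")")) res).getD j "")
      = if j < k then "(" ++ res.getD j "" ++ "," ++ res.getD (m - j - 1) "" ++ ")" else res.getD j "" := by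
  intro k
  induction k with
  | zero => intro _ j; simp
  | succ k ih =>
    intro hk j
    have hk' : k ≤ m / 2 := by omega
    rw [List.range_succ, List.foldl_append]
    simp only [List.foldl_cons, List.foldl_nil]
    have hrk := ih hk' k
    have hrmk := ih hk' (m - k - 1)
    rw [if_neg (by omega : ¬ k < k)] at hrk
    rw [if_neg (by omega : ¬ m - k - 1 < k)] at hrmk
    set F := (List.range k).foldl
        (fun r i => r.set i ("(" ++ r.getD i "" ++ "," ++ r.getD (m - i - 1) "" ++ ")")) res with hF
    have hFlen : F.length = res.length := pv_foldl_set_length _ (List.range k) res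
    by_cases hjk : j = k
    · subst hjk
      rw [pv_getD_set_eq F j _ (by omega), hrk, hrmk, if_pos (by omega)]
    · rw [pv_getD_set_ne F k j _ (Ne.symm hjk), ih hk' j]
      by_cases hjk2 : j < k
      · rw [if_pos hjk2, if_pos (by omega)]
      · rw [if_neg hjk2, if_neg (by omega)]

-- the steps i ≥ m/2 of A's round write only indices ≥ m/2, so the prefix below m/2 is stable
theorem pv_fold_high (m : Nat) :
    ∀ (l : List Nat) (r : List String), (∀ i ∈ l, m / 2 ≤ i) → ∀ j, j < m / 2 →
      ((l.foldl (fun r i => r.set i ("(" ++ r.getD i "" ++ "," ++ r.getD (m - i - 1) "" ++ ")")) r).getD j "")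
      = r.getD j "" := by
  intro l
  induction l with
  | nil => intro r _ j _; rfl
  | cons i l ih =>
    intro r hmem j hj
    rw [List.foldl_cons, ih _ (fun x hx => hmem x (List.mem_cons_of_mem _ hx)) j hj,
        pv_getD_set_ne r i j _ (by have := hmem i (List.mem_cons_self ..); omega)]

-- the first m/2 entries after A's full round over range m
theorem pv_round_getD (m : Nat) (res : List String) (hm : m ≤ res.length) (j : Nat) (hj : j < m / 2) :
    (findContestMatch.round m res).getD j ""
      = "(" ++ res.getD j "" ++ "," ++ res.getD (m - j - 1) "" ++ ")" := by
  unfold findContestMatch.round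
  have hsplit : List.range m = List.range (m / 2) ++ (List.range' (m / 2) (m - m / 2)) := by
    rw [List.range_eq_range',
        show List.range' 0 m = List.range' 0 (m / 2 + (m - m / 2)) by rw [Nat.add_sub_cancel' (Nat.div_le_self m 2)],
        ← List.range'_append (s := 0) (m := m / 2) (n := m - m / 2) (step := 1)]
    rw [List.range_eq_range']
    simp
  rw [hsplit, List.foldl_append]
  rw [pv_fold_high m _ _ (fun i hi => by
        have := List.mem_range'.mp hi; omega) j hj]
  rw [pv_fold_prefix m res hm (m / 2) le_rfl j, if_pos hj]

-- B's step on the first-m prefix equals the first-m/2 prefix of A's round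
theorem pv_step_take (m : Nat) (res : List String) (h2 : 2 ≤ m) (hm : m ≤ res.length) :
    findContestMatch_alt.step (res.take m) = (findContestMatch.round m res).take (m / 2) := by
  have hlen : (res.take m).length = m := by simp; omega
  have hrl : (findContestMatch.round m res).length = res.length := pv_round_length m res
  apply List.ext_getElem
  · simp [findContestMatch_alt.step, hlen, hrl]; omega
  · intro j hj1 hj2
    have hjm : j < m / 2 := by
      simp [findContestMatch_alt.step, hlen] at hj1; omega
    simp only [findContestMatch_alt.step, hlen, List.getElem_map, List.getElem_range,
      List.getElem_take]
    have hgr : (findContestMatch.round m res)[j] = (findContestMatch.round m res).getD j "" := by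
      simp [List.getD, List.getElem?_eq_getElem (by omega : j < (findContestMatch.round m res).length)]
    rw [hgr, pv_round_getD m res hm j hjm,
        pv_getD_take res m j (by omega), pv_getD_take res m (m - j - 1) (by omega)]

-- main invariant: A's helper on the length-m prefix and B's loop agree on the head
theorem pv_main (m : Nat) : ∀ (res : List String), 1 ≤ m → m ≤ res.length →
    (findContestMatch.helper m res).headD "" = (findContestMatch_alt.loop (res.take m)).headD "" := by
  induction m using Nat.strong_induction_on with
  | _ m ih =>
    intro res h1 hm
    match m, h1 with
    | 1, _ =>
      rw [findContestMatch.helper, findContestMatch_alt.loop]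
      rw [if_neg (by simp)]
      cases res with
      | nil => simp at hm
      | cons a l => simp
    | (k+2), _ =>
      rw [findContestMatch.helper]
      rw [findContestMatch_alt.loop, if_pos (by simp [List.length_take]; omega)]
      rw [pv_step_take (k+2) res (by omega) hm]
      exact ih ((k+2)/2) (by omega) (findContestMatch.round (k+2) res) (by omega)
        (by rw [pv_round_length]; omega)

-- ===== VERDICT (by name: the statement is the Claim_ definition above) =====
theorem findContestMatch_spec : Claim_equal_findContestMatch := by
  intro n _ hpre
  have hn : 1 ≤ n := hpre
  unfold Spec_findContestMatch findContestMatch findContestMatch_alt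
  have hlen : ((PySem.List.pyRange 1 (n+1) 1).map PySem.Int.toStr).length = n.toNat := by
    rw [List.length_map, PySem.List.length_pyRange_one]; omega
  have h := pv_main n.toNat ((PySem.List.pyRange 1 (n+1) 1).map PySem.Int.toStr)
    (by omega) (by omega)
  rw [h, ← hlen, List.take_length]
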